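/- GENERATED by tools/mkcompositions.py from design/units.gif.tsv (unit `DGifCloseFile.COMPOSITION`) — do not edit.
   THE PROOF of the composition unit `DGifCloseFile.COMPOSITION`: the 5 segments of `DGifCloseFile` chain into its contract, by the theorem
   `Gif.Spec.DGifCloseFile.compose` (proved next to the cut assertions). -/
import Gif.Spec.Units.DGifCloseFile_COMPOSITION

/-- The segments of `DGifCloseFile` compose into its contract. -/
theorem Gif.Spec.Proved.DGifCloseFile_COMPOSITION_ok : Gif.Spec.DGifCloseFile_COMPOSITION.Statement := by
  intro Lay _hLay μ _hμ u₀ h_DGifCloseFile_1 h_DGifCloseFile_2 h_DGifCloseFile_3 h_DGifCloseFile_4 h_DGifCloseFile_5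
  apply Gif.Spec.DGifCloseFile.compose
  all_goals assumption
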